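-- pv_equiv track=rewrite | github.com/Tejapusarla-13/python_practice | List_excercises/list_20.py | new_item_append
-- ===== SOURCE A (Python) =====
-- def new_item_append(list1):
--     for i in list1:
--         if isinstance(i,list):
--          for j in i:
--             if isinstance(j,list):
--                 for h in j:
--                     if h == 6000:
--                         j.append(7000)
--
--     return list1
-- ===== SOURCE B (Python) =====
-- def new_item_append(list1):
--     # Pure recursive rebuild of each innermost list: one cons-building recursion
--     # carries a counter of 7000s "owed" and emits them when the list is exhausted.
--     # The rebuilt list replaces the inner list's contents in place (same objects mutated).
--     def go(rest, owed):
--         if not rest: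
--             if owed == 0:
--                 return []
--             return [7000] + go(rest, owed - 1)
--         h = rest[0]
--         return [h] + go(rest[1:], owed + 1 if h == 6000 else owed)
--
--     for i in list1:
--         if isinstance(i, list):
--             for j in i:
--                 if isinstance(j, list):
--                     j[:] = go(j, 0)
--     return list1
-- ===== Notes on version B (the rewrite author's own statement) =====
-- stated objective: alternative
-- what changed: Replaces A's mutate-while-iterate loop (appending 7000 to the list being iterated whenever a 6000 is seen, so the iterator walks over the growing tail) by a pure cons-building recursion that rebuilds each innermost list in one structural pass, carrying a counter of owed 7000s and emitting them recursively at the end; the result replaces the inner list's contents via slice assignment.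
import Mathlib
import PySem

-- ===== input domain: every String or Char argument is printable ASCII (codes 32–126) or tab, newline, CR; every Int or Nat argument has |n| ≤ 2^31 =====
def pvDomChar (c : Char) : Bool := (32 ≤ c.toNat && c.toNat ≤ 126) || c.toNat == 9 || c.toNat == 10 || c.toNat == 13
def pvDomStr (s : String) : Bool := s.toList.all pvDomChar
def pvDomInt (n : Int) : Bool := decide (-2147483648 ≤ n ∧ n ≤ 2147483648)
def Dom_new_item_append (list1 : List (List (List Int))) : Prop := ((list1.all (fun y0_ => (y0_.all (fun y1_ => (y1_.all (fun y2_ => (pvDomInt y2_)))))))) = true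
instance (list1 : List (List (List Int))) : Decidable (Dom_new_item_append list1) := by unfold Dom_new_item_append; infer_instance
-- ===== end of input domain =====

-- B rebuilds each innermost list by a pure cons-building recursion with an "owed 7000s" counter
-- instead of A's mutate-while-iterate append loop (alternative decomposition);
-- in Python both mutate the inner lists of the argument in place; the theorems are about the return value.

-- ===== PORT A =====
-- A's innermost loop: Python's iterator also visits the 7000s appended during iteration;
-- `todo` is the part of the (growing) list not yet visited, `done` (reversed) the visited part.
def visitA (todo : List Int) (done : List Int) : List Int :=
  match h : todo with
  | [] => done.reverse
  | h0 :: t =>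
      if h0 = 6000 then visitA (t ++ [7000]) (h0 :: done)
      else visitA t (h0 :: done)
termination_by (todo.count 6000, todo.length)
decreasing_by
  · simp_all [List.count_append]
    omega
  · simp_all [List.count_append]
    omega

def new_item_append (list1 : List (List (List Int))) : List (List (List Int)) :=
  list1.map (fun i => i.map (fun j => visitA j []))

-- ===== PORT B =====
-- Source B's recursive helper `go`: cons each head back, bump `owed` on a 6000,
-- and when the list is exhausted emit the owed 7000s one recursive step at a time.
def goB (rest : List Int) (owed : Nat) : List Int :=
  match rest, owed with
  | [], 0 => []
  | [], Nat.succ n => 7000 :: goB [] n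
  | h :: t, n => h :: goB t (if h = 6000 then n + 1 else n)

def new_item_append_alt (list1 : List (List (List Int))) : List (List (List Int)) :=
  list1.map (fun i => i.map (fun j => goB j 0))

-- ===== PRECONDITION & SPEC =====
def Spec_new_item_append (list1 : List (List (List Int))) (out : List (List (List Int))) : Prop := out = new_item_append_alt list1
instance (list1 : List (List (List Int))) (out : List (List (List Int))) : Decidable (Spec_new_item_append list1 out) := by unfold Spec_new_item_append; infer_instance

-- ===== CLAIM (what is proved, stated in full; the proofs are below) =====
def Claim_equal_new_item_append : Prop := ∀ (list1 : List (List (List Int))), Dom_new_item_append list1 → Spec_new_item_append list1 (new_item_append list1)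

-- ===== LEMMAS AND PROOFS =====
theorem visitA_eq (todo done : List Int) :
    visitA todo done = done.reverse ++ todo ++ List.replicate (todo.count 6000) 7000 := by
  induction todo, done using visitA.induct with
  | case1 d => simp [visitA]
  | case2 t d ih =>
      rw [visitA.eq_def]
      simp only [List.count_append, List.count_cons] at ih ⊢
      simp [ih, List.replicate_succ]
  | case3 t d a b ih =>
      rw [visitA.eq_def]
      simp_all

theorem goB_eq (rest : List Int) (owed : Nat) :
    goB rest owed = rest ++ List.replicate (owed + rest.count 6000) 7000 := by
  induction rest generalizing owed with
  | nil =>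
      induction owed with
      | zero => simp [goB]
      | succ n ih => simp [goB, ih, List.replicate_succ]
  | cons h t ih =>
      rw [goB]
      by_cases hh : h = 6000 <;> simp [hh, ih, List.count_cons] <;> ring_nf

-- ===== VERDICT (by name: the statement is the Claim_ definition above) =====
theorem new_item_append_spec : Claim_equal_new_item_append := by
  intro list1 _
  unfold Spec_new_item_append new_item_append new_item_append_alt
  simp [visitA_eq, goB_eq]
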